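-- pv_equiv track=rewrite | github.com/mortyc126-debug/SHA | dimension/ultimate_attack.py | sha256_r
-- ===== SOURCE A (Python) =====
-- MASK32 = 0xFFFFFFFF
--
-- def rotr(x, n): return ((x >> n) | (x << (32 - n))) & MASK32
--
-- def add32(x, y): return (x + y) & MASK32
--
-- def Sigma0(x): return rotr(x, 2) ^ rotr(x, 13) ^ rotr(x, 22)
--
-- def Sigma1(x): return rotr(x, 6) ^ rotr(x, 11) ^ rotr(x, 25)
--
-- def Ch(e, f, g): return (e & f) ^ (~e & g) & MASK32
--
-- def Maj(a, b, c): return (a & b) ^ (a & c) ^ (b & c)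
--
-- def sigma0(x): return rotr(x, 7) ^ rotr(x, 18) ^ (x >> 3)
--
-- def sigma1(x): return rotr(x, 17) ^ rotr(x, 19) ^ (x >> 10)
--
-- K = [
--     0x428a2f98,0x71374491,0xb5c0fbcf,0xe9b5dba5,0x3956c25b,0x59f111f1,0x923f82a4,0xab1c5ed5,
--     0xd807aa98,0x12835b01,0x243185be,0x550c7dc3,0x72be5d74,0x80deb1fe,0x9bdc06a7,0xc19bf174,
--     0xe49b69c1,0xefbe4786,0x0fc19dc6,0x240ca1cc,0x2de92c6f,0x4a7484aa,0x5cb0a9dc,0x76f988da,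
--     0x983e5152,0xa831c66d,0xb00327c8,0xbf597fc7,0xc6e00bf3,0xd5a79147,0x06ca6351,0x14292967,
--     0x27b70a85,0x2e1b2138,0x4d2c6dfc,0x53380d13,0x650a7354,0x766a0abb,0x81c2c92e,0x92722c85,
--     0xa2bfe8a1,0xa81a664b,0xc24b8b70,0xc76c51a3,0xd192e819,0xd6990624,0xf40e3585,0x106aa070,
--     0x19a4c116,0x1e376c08,0x2748774c,0x34b0bcb5,0x391c0cb3,0x4ed8aa4a,0x5b9cca4f,0x682e6ff3,
--     0x748f82ee,0x78a5636f,0x84c87814,0x8cc70208,0x90befffa,0xa4506ceb,0xbef9a3f7,0xc67178f2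
-- ]
--
-- IV = [0x6a09e667, 0xbb67ae85, 0x3c6ef372, 0xa54ff53a,
--       0x510e527f, 0x9b05688c, 0x1f83d9ab, 0x5be0cd19]
--
-- def sha256_r(W16, n_r):
--     W = list(W16)
--     for r in range(16, max(n_r, 16)):
--         W.append(add32(add32(add32(sigma1(W[r-2]), W[r-7]), sigma0(W[r-15])), W[r-16]))
--     a,b,c,d,e,f,g,h = IV
--     for r in range(n_r):
--         T1 = add32(add32(add32(add32(h, Sigma1(e)), Ch(e,f,g)), K[r]), W[r])
--         T2 = add32(Sigma0(a), Maj(a,b,c))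
--         h,g,f,e = g,f,e,add32(d,T1)
--         d,c,b,a = c,b,a,add32(T1,T2)
--     return tuple(add32(IV[i], [a,b,c,d,e,f,g,h][i]) for i in range(8))
-- ===== SOURCE B (Python) =====
-- MASK32 = 0xFFFFFFFF
--
-- def rotr(x, n): return ((x >> n) | (x << (32 - n))) & MASK32
--
-- def add32(x, y): return (x + y) & MASK32
--
-- def Sigma0(x): return rotr(x, 2) ^ rotr(x, 13) ^ rotr(x, 22)
--
-- def Sigma1(x): return rotr(x, 6) ^ rotr(x, 11) ^ rotr(x, 25)
--
-- def Ch(e, f, g): return (e & f) ^ (~e & g) & MASK32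
--
-- def Maj(a, b, c): return (a & b) ^ (a & c) ^ (b & c)
--
-- def sigma0(x): return rotr(x, 7) ^ rotr(x, 18) ^ (x >> 3)
--
-- def sigma1(x): return rotr(x, 17) ^ rotr(x, 19) ^ (x >> 10)
--
-- K = [
--     0x428a2f98,0x71374491,0xb5c0fbcf,0xe9b5dba5,0x3956c25b,0x59f111f1,0x923f82a4,0xab1c5ed5,
--     0xd807aa98,0x12835b01,0x243185be,0x550c7dc3,0x72be5d74,0x80deb1fe,0x9bdc06a7,0xc19bf174,
--     0xe49b69c1,0xefbe4786,0x0fc19dc6,0x240ca1cc,0x2de92c6f,0x4a7484aa,0x5cb0a9dc,0x76f988da,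
--     0x983e5152,0xa831c66d,0xb00327c8,0xbf597fc7,0xc6e00bf3,0xd5a79147,0x06ca6351,0x14292967,
--     0x27b70a85,0x2e1b2138,0x4d2c6dfc,0x53380d13,0x650a7354,0x766a0abb,0x81c2c92e,0x92722c85,
--     0xa2bfe8a1,0xa81a664b,0xc24b8b70,0xc76c51a3,0xd192e819,0xd6990624,0xf40e3585,0x106aa070,
--     0x19a4c116,0x1e376c08,0x2748774c,0x34b0bcb5,0x391c0cb3,0x4ed8aa4a,0x5b9cca4f,0x682e6ff3,
--     0x748f82ee,0x78a5636f,0x84c87814,0x8cc70208,0x90befffa,0xa4506ceb,0xbef9a3f7,0xc67178f2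
-- ]
--
-- IV = [0x6a09e667, 0xbb67ae85, 0x3c6ef372, 0xa54ff53a,
--       0x510e527f, 0x9b05688c, 0x1f83d9ab, 0x5be0cd19]
--
-- def sha256_r(W16, n_r):
--     # Single fused pass: schedule words are produced on demand from a rolling
--     # window of the last len(W16) words instead of materialising the full W list.
--     Wl = list(W16)
--     L = len(Wl)
--     win = []          # the last (at most L) schedule words seen so far
--     a, b, c, d, e, f, g, h = IV
--     for r in range(n_r):
--         if r < L:
--             w = Wl[r]
--         else:
--             w = add32(add32(add32(sigma1(win[14]), win[9]), sigma0(win[1])), win[0])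
--         win.append(w)
--         if len(win) > L:
--             win.pop(0)
--         T1 = add32(add32(add32(add32(h, Sigma1(e)), Ch(e, f, g)), K[r]), w)
--         T2 = add32(Sigma0(a), Maj(a, b, c))
--         h, g, f, e = g, f, e, add32(d, T1)
--         d, c, b, a = c, b, a, add32(T1, T2)
--     return tuple(add32(IV[i], v) for i, v in enumerate([a, b, c, d, e, f, g, h]))
-- ===== Notes on version B (the rewrite author's own statement) =====
-- stated objective: alternative
-- what changed: A first materialises the whole extended message schedule W in one loop and then runs the compression rounds in a second loop over it; B fuses the two passes into a single loop over the rounds that produces each schedule word on demand from a bounded rolling window of the last len(W16) words, never building the full schedule list.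
import Mathlib
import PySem

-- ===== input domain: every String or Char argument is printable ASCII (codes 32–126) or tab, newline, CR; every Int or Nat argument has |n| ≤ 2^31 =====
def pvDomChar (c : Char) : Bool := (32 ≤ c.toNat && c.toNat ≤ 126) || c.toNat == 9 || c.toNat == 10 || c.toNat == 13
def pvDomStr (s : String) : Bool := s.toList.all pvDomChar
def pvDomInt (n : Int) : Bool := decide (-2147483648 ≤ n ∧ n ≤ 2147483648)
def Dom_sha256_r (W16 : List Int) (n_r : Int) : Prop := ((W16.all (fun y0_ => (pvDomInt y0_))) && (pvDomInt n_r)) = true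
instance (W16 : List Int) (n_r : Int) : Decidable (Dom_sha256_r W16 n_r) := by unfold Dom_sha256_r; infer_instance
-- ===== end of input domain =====

-- B fuses A's two passes (schedule extension, then compression) into one loop that keeps
-- only a bounded rolling window of schedule words; same values, alternative structure.

-- ===== shared module-level helpers (MASK32, rotr, add32, Sigma/sigma, Ch, Maj, K, IV) =====
def pvMASK32 : Int := 4294967295
def pvRotr (x : Int) (n : Nat) : Int :=
  PySem.Int.band (PySem.Int.bor (x >>> n) (x <<< (32 - n))) pvMASK32
def pvAdd32 (x y : Int) : Int := PySem.Int.band (x + y) pvMASK32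
def pvSigma0 (x : Int) : Int := PySem.Int.bxor (PySem.Int.bxor (pvRotr x 2) (pvRotr x 13)) (pvRotr x 22)
def pvSigma1 (x : Int) : Int := PySem.Int.bxor (PySem.Int.bxor (pvRotr x 6) (pvRotr x 11)) (pvRotr x 25)
-- Ch keeps Python's precedence: (e&f) ^ ((~e & g) & MASK32)
def pvCh (e f g : Int) : Int :=
  PySem.Int.bxor (PySem.Int.band e f) (PySem.Int.band (PySem.Int.band (Int.not e) g) pvMASK32)
def pvMaj (a b c : Int) : Int :=
  PySem.Int.bxor (PySem.Int.bxor (PySem.Int.band a b) (PySem.Int.band a c)) (PySem.Int.band b c)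
def pvsigma0 (x : Int) : Int := PySem.Int.bxor (PySem.Int.bxor (pvRotr x 7) (pvRotr x 18)) (x >>> 3)
def pvsigma1 (x : Int) : Int := PySem.Int.bxor (PySem.Int.bxor (pvRotr x 17) (pvRotr x 19)) (x >>> 10)
def pvK : List Int := [
  0x428a2f98,0x71374491,0xb5c0fbcf,0xe9b5dba5,0x3956c25b,0x59f111f1,0x923f82a4,0xab1c5ed5,
  0xd807aa98,0x12835b01,0x243185be,0x550c7dc3,0x72be5d74,0x80deb1fe,0x9bdc06a7,0xc19bf174,
  0xe49b69c1,0xefbe4786,0x0fc19dc6,0x240ca1cc,0x2de92c6f,0x4a7484aa,0x5cb0a9dc,0x76f988da,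
  0x983e5152,0xa831c66d,0xb00327c8,0xbf597fc7,0xc6e00bf3,0xd5a79147,0x06ca6351,0x14292967,
  0x27b70a85,0x2e1b2138,0x4d2c6dfc,0x53380d13,0x650a7354,0x766a0abb,0x81c2c92e,0x92722c85,
  0xa2bfe8a1,0xa81a664b,0xc24b8b70,0xc76c51a3,0xd192e819,0xd6990624,0xf40e3585,0x106aa070,
  0x19a4c116,0x1e376c08,0x2748774c,0x34b0bcb5,0x391c0cb3,0x4ed8aa4a,0x5b9cca4f,0x682e6ff3,
  0x748f82ee,0x78a5636f,0x84c87814,0x8cc70208,0x90befffa,0xa4506ceb,0xbef9a3f7,0xc67178f2]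
def pvIV : List Int := [0x6a09e667, 0xbb67ae85, 0x3c6ef372, 0xa54ff53a,
                        0x510e527f, 0x9b05688c, 0x1f83d9ab, 0x5be0cd19]

-- state (a,b,c,d,e,f,g,h)
def pvState := Int × Int × Int × Int × Int × Int × Int × Int
def pvInit : pvState := (0x6a09e667, 0xbb67ae85, 0x3c6ef372, 0xa54ff53a,
                         0x510e527f, 0x9b05688c, 0x1f83d9ab, 0x5be0cd19)

-- ===== PORT A =====
def sha256_r (W16 : List Int) (n_r : Int) : List Int :=
  let W : List Int :=
    (PySem.List.pyRange 16 (max n_r 16) 1).foldl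
      (fun W r =>
        W ++ [pvAdd32 (pvAdd32 (pvAdd32 (pvsigma1 (PySem.List.pyGetD W (r-2) 0))
                (PySem.List.pyGetD W (r-7) 0)) (pvsigma0 (PySem.List.pyGetD W (r-15) 0)))
              (PySem.List.pyGetD W (r-16) 0)]) W16
  let s : pvState :=
    (PySem.List.pyRange 0 n_r 1).foldl
      (fun (s : pvState) r =>
        match s with
        | (a,b,c,d,e,f,g,h) =>
          let T1 := pvAdd32 (pvAdd32 (pvAdd32 (pvAdd32 h (pvSigma1 e)) (pvCh e f g))
                      (PySem.List.pyGetD pvK r 0)) (PySem.List.pyGetD W r 0)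
          let T2 := pvAdd32 (pvSigma0 a) (pvMaj a b c)
          (pvAdd32 T1 T2, a, b, c, pvAdd32 d T1, e, f, g)) pvInit
  match s with
  | (a,b,c,d,e,f,g,h) =>
    (PySem.List.pyRange 0 8 1).map
      (fun i => pvAdd32 (PySem.List.pyGetD pvIV i 0) (PySem.List.pyGetD [a,b,c,d,e,f,g,h] i 0))

-- ===== PORT B =====
def sha256_r_alt (W16 : List Int) (n_r : Int) : List Int :=
  let L : Nat := W16.length
  let st : pvState × List Int :=
    (PySem.List.pyRange 0 n_r 1).foldl
      (fun (st : pvState × List Int) r =>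
        match st with
        | ((a,b,c,d,e,f,g,h), win) =>
          let w := if r < (L : Int) then PySem.List.pyGetD W16 r 0
                   else pvAdd32 (pvAdd32 (pvAdd32 (pvsigma1 (PySem.List.pyGetD win 14 0))
                          (PySem.List.pyGetD win 9 0)) (pvsigma0 (PySem.List.pyGetD win 1 0)))
                        (PySem.List.pyGetD win 0 0)
          let win := win ++ [w]
          let win := if L < win.length then win.tail else win   -- win.pop(0)
          let T1 := pvAdd32 (pvAdd32 (pvAdd32 (pvAdd32 h (pvSigma1 e)) (pvCh e f g))
                      (PySem.List.pyGetD pvK r 0)) w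
          let T2 := pvAdd32 (pvSigma0 a) (pvMaj a b c)
          ((pvAdd32 T1 T2, a, b, c, pvAdd32 d T1, e, f, g), win))
      (pvInit, [])
  match st.1 with
  | (a,b,c,d,e,f,g,h) =>
    (PySem.List.enumerate [a,b,c,d,e,f,g,h] 0).map
      (fun p => pvAdd32 (PySem.List.pyGetD pvIV p.1 0) p.2)

-- ===== PRECONDITION & SPEC =====
-- Pre_ excludes exactly the inputs where A raises IndexError: rounds past K's 64 entries
-- (n_r > 64) and schedules shorter than the rounds need (len(W16) < min(max(n_r,0),16)).
def Pre_sha256_r (W16 : List Int) (n_r : Int) : Prop :=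
  n_r ≤ 64 ∧ min (max n_r 0) 16 ≤ (W16.length : Int)
instance (W16 : List Int) (n_r : Int) : Decidable (Pre_sha256_r W16 n_r) := by
  unfold Pre_sha256_r; infer_instance
def pvWitness_sha256_r : List Int × Int :=
  ([1,2,3,4,5,6,7,8,9,10,11,12,13,14,15,16], 20)
def Spec_sha256_r (W16 : List Int) (n_r : Int) (out : List Int) : Prop := out = sha256_r_alt W16 n_r
instance (W16 : List Int) (n_r : Int) (out : List Int) : Decidable (Spec_sha256_r W16 n_r out) := by
  unfold Spec_sha256_r; infer_instance

-- ===== CLAIM (what is proved, stated in full; the proofs are below) =====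
def Claim_equal_sha256_r : Prop := ∀ (W16 : List Int) (n_r : Int), Dom_sha256_r W16 n_r → Pre_sha256_r W16 n_r → Spec_sha256_r W16 n_r (sha256_r W16 n_r)


-- ===== LEMMAS AND PROOFS =====

-- proof-layer names for the two loop bodies and the tails of the ports
def pvExt (W16 : List Int) (n_r : Int) : List Int :=
  (PySem.List.pyRange 16 (max n_r 16) 1).foldl
    (fun W r =>
      W ++ [pvAdd32 (pvAdd32 (pvAdd32 (pvsigma1 (PySem.List.pyGetD W (r-2) 0))
              (PySem.List.pyGetD W (r-7) 0)) (pvsigma0 (PySem.List.pyGetD W (r-15) 0)))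
            (PySem.List.pyGetD W (r-16) 0)]) W16

def pvBodyA (W : List Int) (s : pvState) (r : Int) : pvState :=
  match s with
  | (a,b,c,d,e,f,g,h) =>
    let T1 := pvAdd32 (pvAdd32 (pvAdd32 (pvAdd32 h (pvSigma1 e)) (pvCh e f g))
                (PySem.List.pyGetD pvK r 0)) (PySem.List.pyGetD W r 0)
    let T2 := pvAdd32 (pvSigma0 a) (pvMaj a b c)
    (pvAdd32 T1 T2, a, b, c, pvAdd32 d T1, e, f, g)

def pvBodyB (W16 : List Int) (st : pvState × List Int) (r : Int) : pvState × List Int :=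
  match st with
  | ((a,b,c,d,e,f,g,h), win) =>
    let w := if r < (W16.length : Int) then PySem.List.pyGetD W16 r 0
             else pvAdd32 (pvAdd32 (pvAdd32 (pvsigma1 (PySem.List.pyGetD win 14 0))
                    (PySem.List.pyGetD win 9 0)) (pvsigma0 (PySem.List.pyGetD win 1 0)))
                  (PySem.List.pyGetD win 0 0)
    let win := win ++ [w]
    let win := if W16.length < win.length then win.tail else win
    let T1 := pvAdd32 (pvAdd32 (pvAdd32 (pvAdd32 h (pvSigma1 e)) (pvCh e f g))
                (PySem.List.pyGetD pvK r 0)) w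
    let T2 := pvAdd32 (pvSigma0 a) (pvMaj a b c)
    ((pvAdd32 T1 T2, a, b, c, pvAdd32 d T1, e, f, g), win)

def pvFinishA (s : pvState) : List Int :=
  match s with
  | (a,b,c,d,e,f,g,h) =>
    (PySem.List.pyRange 0 8 1).map
      (fun i => pvAdd32 (PySem.List.pyGetD pvIV i 0) (PySem.List.pyGetD [a,b,c,d,e,f,g,h] i 0))

def pvFinishB (s : pvState) : List Int :=
  match s with
  | (a,b,c,d,e,f,g,h) =>
    (PySem.List.enumerate [a,b,c,d,e,f,g,h] 0).map
      (fun p => pvAdd32 (PySem.List.pyGetD pvIV p.1 0) p.2)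

lemma portA_eq (W16 : List Int) (n_r : Int) :
    sha256_r W16 n_r =
      pvFinishA ((PySem.List.pyRange 0 n_r 1).foldl (pvBodyA (pvExt W16 n_r)) pvInit) := rfl

lemma portB_eq (W16 : List Int) (n_r : Int) :
    sha256_r_alt W16 n_r =
      pvFinishB (((PySem.List.pyRange 0 n_r 1).foldl (pvBodyB W16) (pvInit, [])).1) := rfl

lemma finish_eq (s : pvState) : pvFinishA s = pvFinishB s := by
  obtain ⟨a,b,c,d,e,f,g,h⟩ := s; rfl

-- the schedule-word sequence, described through the rolling window
def pvNew (ws : List Int) : Int :=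
  pvAdd32 (pvAdd32 (pvAdd32 (pvsigma1 (ws.getD 14 0)) (ws.getD 9 0)) (pvsigma0 (ws.getD 1 0)))
    (ws.getD 0 0)

def pvWinSeq (W16 : List Int) : Nat → List Int
  | 0 => W16
  | j+1 => (pvWinSeq W16 j).tail ++ [pvNew (pvWinSeq W16 j)]

def pvWAt (W16 : List Int) (i : Nat) : Int :=
  if i < W16.length then W16.getD i 0 else pvNew (pvWinSeq W16 (i - W16.length))

def pvWfin (W16 : List Int) (E : Nat) : List Int :=
  W16 ++ (List.range E).map (fun j => pvNew (pvWinSeq W16 j))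

def pvWinD (W16 : List Int) (r : Nat) : List Int :=
  if r < W16.length then W16.take r else pvWinSeq W16 (r - W16.length)

lemma length_winSeq (W16 : List Int) (h : 1 ≤ W16.length) (j : Nat) :
    (pvWinSeq W16 j).length = W16.length := by
  induction j with
  | zero => rfl
  | succ j ih =>
    simp [pvWinSeq, List.length_tail, ih]
    omega

lemma getD_winSeq (W16 : List Int) (hL : 15 ≤ W16.length) (j : Nat) :
    ∀ k, k < W16.length → (pvWinSeq W16 j).getD k 0 = pvWAt W16 (j + k) := by
  induction j with
  | zero => intro k hk; simp [pvWinSeq, pvWAt, hk]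
  | succ j ih =>
    intro k hk
    have hlen := length_winSeq W16 (by omega) j
    have htl : (pvWinSeq W16 j).tail.length = W16.length - 1 := by
      simp [List.length_tail, hlen]
    show ((pvWinSeq W16 j).tail ++ [pvNew (pvWinSeq W16 j)]).getD k 0 = _
    by_cases hk1 : k < W16.length - 1
    · rw [List.getD_append _ _ _ _ (by omega)]
      have htg : (pvWinSeq W16 j).tail.getD k 0 = (pvWinSeq W16 j).getD (k+1) 0 := by
        cases hws : pvWinSeq W16 j with
        | nil => rw [hws] at hlen; simp at hlen; omega
        | cons x xs => simp
      rw [htg, ih (k+1) (by omega)]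
      congr 1; omega
    · have hk2 : k = W16.length - 1 := by omega
      rw [List.getD_append_right _ _ _ _ (by omega)]
      have hz : k - (pvWinSeq W16 j).tail.length = 0 := by omega
      rw [hz]
      simp only [List.getD_cons_zero]
      rw [pvWAt, if_neg (by omega)]
      have he : j + 1 + k - W16.length = j := by omega
      rw [he]

lemma getD_Wfin (W16 : List Int) (E i : Nat) (h : i < W16.length + E) :
    (pvWfin W16 E).getD i 0 = pvWAt W16 i := by
  by_cases hi : i < W16.length
  · rw [pvWfin, List.getD_append _ _ _ _ hi, pvWAt, if_pos hi]
  · rw [pvWfin, List.getD_append_right _ _ _ _ (by omega), pvWAt, if_neg hi]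
    have hlt : i - W16.length < E := by omega
    rw [List.getD_eq_getElem _ _ (by simpa using hlt)]
    simp

lemma ext_step (W16 : List Int) (E : Nat) (hL : 15 ≤ W16.length) :
    pvAdd32 (pvAdd32 (pvAdd32 (pvsigma1 (PySem.List.pyGetD (pvWfin W16 E) ((16:Int)+(E:Int)-2) 0))
        (PySem.List.pyGetD (pvWfin W16 E) ((16:Int)+(E:Int)-7) 0))
        (pvsigma0 (PySem.List.pyGetD (pvWfin W16 E) ((16:Int)+(E:Int)-15) 0)))
      (PySem.List.pyGetD (pvWfin W16 E) ((16:Int)+(E:Int)-16) 0) = pvNew (pvWinSeq W16 E) := by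
  have h2 : (16:Int) + (E:Int) - 2 = ((14 + E : Nat) : Int) := by push_cast; ring
  have h7 : (16:Int) + (E:Int) - 7 = ((9 + E : Nat) : Int) := by push_cast; ring
  have h15 : (16:Int) + (E:Int) - 15 = ((1 + E : Nat) : Int) := by push_cast; ring
  have h16 : (16:Int) + (E:Int) - 16 = ((E : Nat) : Int) := by ring
  rw [h2, h7, h15, h16, PySem.List.pyGetD_natCast, PySem.List.pyGetD_natCast,
      PySem.List.pyGetD_natCast, PySem.List.pyGetD_natCast,
      getD_Wfin W16 E (14+E) (by omega), getD_Wfin W16 E (9+E) (by omega),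
      getD_Wfin W16 E (1+E) (by omega), getD_Wfin W16 E E (by omega)]
  rw [pvNew, getD_winSeq W16 hL E 14 (by omega), getD_winSeq W16 hL E 9 (by omega),
      getD_winSeq W16 hL E 1 (by omega), getD_winSeq W16 hL E 0 (by omega)]
  rw [Nat.add_comm E 14, Nat.add_comm E 9, Nat.add_comm E 1, Nat.add_zero]

lemma ext_eq (W16 : List Int) (n_r : Int) (E : Nat) (hmax : max n_r 16 = 16 + (E : Int))
    (hE : E = 0 ∨ 15 ≤ W16.length) :
    pvExt W16 n_r = pvWfin W16 E := by
  rw [pvExt, hmax]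
  clear hmax
  rcases hE with h0 | hL
  · subst h0
    rw [PySem.List.pyRange_one_eq_nil (by norm_num)]
    simp [pvWfin]
  · induction E with
    | zero =>
      rw [PySem.List.pyRange_one_eq_nil (by norm_num)]
      simp [pvWfin]
    | succ E ih =>
      have hc : (16 : Int) + ((E+1 : Nat) : Int) = (16 + (E:Int)) + 1 := by push_cast; ring
      rw [hc, PySem.List.pyRange_one_succ_right (by omega), List.foldl_append, ih]
      simp only [List.foldl_cons, List.foldl_nil]
      rw [ext_step W16 E hL, pvWfin, pvWfin, List.range_succ, List.map_append,
          List.map_cons, List.map_nil, ← List.append_assoc]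

lemma pvMain (W16 : List Int) (n_r : Int) (E : Nat)
    (hb : ∀ r : Nat, (r : Int) < n_r → r < W16.length + E ∧ (W16.length ≤ r → 15 ≤ W16.length)) :
    ∀ r : Nat, (r : Int) ≤ n_r →
      (PySem.List.pyRange 0 (r:Int) 1).foldl (pvBodyB W16) (pvInit, []) =
        ((PySem.List.pyRange 0 (r:Int) 1).foldl (pvBodyA (pvWfin W16 E)) pvInit, pvWinD W16 r) := by
  intro r
  induction r with
  | zero =>
    intro _
    rw [PySem.List.pyRange_one_eq_nil (by norm_num)]
    simp only [List.foldl_nil]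
    refine Prod.ext rfl ?_
    show ([] : List Int) = pvWinD W16 0
    rw [pvWinD]
    by_cases h0 : 0 < W16.length
    · rw [if_pos h0, List.take_zero]
    · have hnil : W16 = [] := List.eq_nil_of_length_eq_zero (by omega)
      rw [if_neg h0]
      simp [pvWinSeq, hnil]
  | succ r ih =>
    intro hr1
    have hrlt : (r:Int) < n_r := by push_cast at hr1; omega
    obtain ⟨hbound, hwin⟩ := hb r hrlt
    have hcast : ((r+1:Nat):Int) = (r:Int)+1 := by push_cast; ring
    rw [hcast, PySem.List.pyRange_one_succ_right (by omega), List.foldl_append,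
        List.foldl_append, ih (le_of_lt hrlt)]
    simp only [List.foldl_cons, List.foldl_nil]
    set s := List.foldl (pvBodyA (pvWfin W16 E)) pvInit (PySem.List.pyRange 0 (r:Int) 1) with hs
    obtain ⟨a,b,c,d,e,f,g,h⟩ := s
    simp only [pvBodyA, pvBodyB]
    have hwA : PySem.List.pyGetD (pvWfin W16 E) (r:Int) 0 = pvWAt W16 r := by
      rw [PySem.List.pyGetD_natCast, getD_Wfin W16 E r hbound]
    by_cases hrL : r < W16.length
    · -- direct schedule word from W16
      rw [if_pos (show (r:Int) < (W16.length:Int) by exact_mod_cast hrL)]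
      rw [show pvWinD W16 r = W16.take r from by rw [pvWinD, if_pos hrL]]
      rw [PySem.List.pyGetD_natCast W16 r 0, hwA, pvWAt, if_pos hrL]
      have hlen' : (W16.take r ++ [W16.getD r 0]).length = r + 1 := by
        simp [List.length_take]; omega
      rw [hlen', if_neg (by omega)]
      have htake : W16.take r ++ [W16.getD r 0] = W16.take (r+1) := by
        rw [List.take_add_one, List.getElem?_eq_getElem hrL,
            List.getD_eq_getElem _ _ hrL, Option.toList_some]
      rw [htake]
      have hwd : pvWinD W16 (r+1) = W16.take (r+1) := by
        rw [pvWinD]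
        by_cases h1 : r+1 < W16.length
        · rw [if_pos h1]
        · rw [if_neg h1, show r+1-W16.length = 0 from by omega]
          rw [show pvWinSeq W16 0 = W16 from rfl,
              show r+1 = W16.length from by omega, List.take_length]
      rw [hwd]
    · -- window word
      have hL : 15 ≤ W16.length := hwin (by omega)
      have hj : r - W16.length + W16.length = r := by omega
      rw [if_neg (show ¬((r:Int) < (W16.length:Int)) by exact_mod_cast hrL)]
      rw [show pvWinD W16 r = pvWinSeq W16 (r - W16.length) from by rw [pvWinD, if_neg hrL]]
      have hlw := length_winSeq W16 (by omega) (r - W16.length)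
      have hg14 := getD_winSeq W16 hL (r - W16.length) 14 (by omega)
      have hg9 := getD_winSeq W16 hL (r - W16.length) 9 (by omega)
      have hg1 := getD_winSeq W16 hL (r - W16.length) 1 (by omega)
      have hg0 := getD_winSeq W16 hL (r - W16.length) 0 (by omega)
      have hNew : pvNew (pvWinSeq W16 (r - W16.length)) =
          pvAdd32 (pvAdd32 (pvAdd32 (pvsigma1 (pvWAt W16 (r - W16.length + 14)))
              (pvWAt W16 (r - W16.length + 9))) (pvsigma0 (pvWAt W16 (r - W16.length + 1))))
            (pvWAt W16 (r - W16.length + 0)) := by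
        rw [pvNew, hg14, hg9, hg1, hg0]
      have hwB : pvAdd32 (pvAdd32 (pvAdd32
            (pvsigma1 (PySem.List.pyGetD (pvWinSeq W16 (r - W16.length)) 14 0))
            (PySem.List.pyGetD (pvWinSeq W16 (r - W16.length)) 9 0))
            (pvsigma0 (PySem.List.pyGetD (pvWinSeq W16 (r - W16.length)) 1 0)))
            (PySem.List.pyGetD (pvWinSeq W16 (r - W16.length)) 0 0) =
          pvNew (pvWinSeq W16 (r - W16.length)) := by
        rw [hNew, PySem.List.pyGetD_ofNat', PySem.List.pyGetD_ofNat',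
            PySem.List.pyGetD_ofNat', PySem.List.pyGetD_ofNat', hg14, hg9, hg1, hg0]
      rw [hwB]
      have hwA' : PySem.List.pyGetD (pvWfin W16 E) (r:Int) 0 =
          pvNew (pvWinSeq W16 (r - W16.length)) := by
        rw [hwA, pvWAt, if_neg hrL]
      rw [hwA']
      have hlen' : (pvWinSeq W16 (r - W16.length) ++ [pvNew (pvWinSeq W16 (r - W16.length))]).length
          = W16.length + 1 := by simp [hlw]
      rw [hlen', if_pos (by omega)]
      have hne : pvWinSeq W16 (r - W16.length) ≠ [] := by
        intro hn; rw [hn] at hlw; simp at hlw; omega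
      have htail0 : ∀ (ws : List Int) (y : Int), ws ≠ [] → (ws ++ [y]).tail = ws.tail ++ [y] := by
        intro ws y hne'
        cases ws with
        | nil => exact absurd rfl hne'
        | cons x xs => simp
      have htail : (pvWinSeq W16 (r - W16.length) ++ [pvNew (pvWinSeq W16 (r - W16.length))]).tail
          = pvWinSeq W16 (r - W16.length + 1) := by
        rw [htail0 _ _ hne]
        rfl
      rw [htail]
      have hwd : pvWinD W16 (r+1) = pvWinSeq W16 (r - W16.length + 1) := by
        rw [pvWinD, if_neg (by omega), show r+1-W16.length = r - W16.length + 1 from by omega]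
      rw [hwd]

-- ===== VERDICT (by name: the statement is the Claim_ definition above) =====
theorem sha256_r_spec : Claim_equal_sha256_r := by
  unfold Claim_equal_sha256_r
  intro W16 n_r _ hpre
  obtain ⟨hn64, hmin⟩ := hpre
  unfold Spec_sha256_r
  rw [portA_eq, portB_eq]
  by_cases hneg : n_r ≤ 0
  · rw [PySem.List.pyRange_one_eq_nil hneg]
    simp only [List.foldl_nil]
    exact finish_eq _
  · rw [not_le] at hneg
    set E : Nat := (max n_r 16 - 16).toNat with hE
    have hmax : max n_r 16 = 16 + (E:Int) := by
      rw [hE, Int.toNat_of_nonneg (by omega)]; ring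
    have hEor : E = 0 ∨ 15 ≤ W16.length := by
      by_cases h16 : n_r ≤ 16
      · left; omega
      · right
        have h16L : (16:Int) ≤ (W16.length:Int) := by omega
        omega
    rw [ext_eq W16 n_r E hmax hEor]
    have hb : ∀ r : Nat, (r:Int) < n_r → r < W16.length + E ∧ (W16.length ≤ r → 15 ≤ W16.length) := by
      intro r hr
      constructor
      · by_cases h16 : n_r ≤ 16
        · have : (r:Int) < (W16.length:Int) := by omega
          omega
        · have h16L : (16:Int) ≤ (W16.length:Int) := by omega
          omega
      · intro hLr
        by_cases h16 : n_r ≤ 16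
        · exfalso
          have : (W16.length:Int) ≤ (r:Int) := by exact_mod_cast hLr
          omega
        · have h16L : (16:Int) ≤ (W16.length:Int) := by omega
          omega
    have hNeq : n_r = ((n_r.toNat : Nat) : Int) := (Int.toNat_of_nonneg (by omega)).symm
    rw [hNeq, pvMain W16 n_r E hb n_r.toNat (by omega)]
    exact finish_eq _
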